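-- pv_equiv track=rewrite | github.com/ADavila7/SoftwareQuality | A01039334_A4.2/ConvertNumbers/convertNumbers.py | find_max_bit
-- ===== SOURCE A (Python) =====
-- def find_max_bit(data):
--     """
--     Búsqueda del mayor número de bits que se necesitan para las conversiones.
--     """
--     max_abs = 0
--     num_bits = 1
--     for number in data:
--         abs_val = abs(number)
--         if abs_val > max_abs:
--             max_abs = abs_val
--     max_bit = 1
--     while max_bit < max_abs + 1:
--         max_bit *= 2
--         num_bits = num_bits +1
--     max_rem = num_bits % 4
--     if max_rem == 0:
--         return num_bits
--     max_bits = num_bits + (4 - max_rem)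
--     return max_bits
-- ===== SOURCE B (Python) =====
-- def find_max_bit(data):
--     max_abs = max(map(abs, data), default=0)
--     num_bits = max_abs.bit_length() + 1
--     return ((num_bits + 3) // 4) * 4
-- ===== Notes on version B (the rewrite author's own statement) =====
-- stated objective: simpler
-- what changed: Replaced the explicit doubling while-loop that counts bits and the modulo-branch rounding with a closed form: max_abs.bit_length() + 1 and a single ceiling-division expression.
import Mathlib
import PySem

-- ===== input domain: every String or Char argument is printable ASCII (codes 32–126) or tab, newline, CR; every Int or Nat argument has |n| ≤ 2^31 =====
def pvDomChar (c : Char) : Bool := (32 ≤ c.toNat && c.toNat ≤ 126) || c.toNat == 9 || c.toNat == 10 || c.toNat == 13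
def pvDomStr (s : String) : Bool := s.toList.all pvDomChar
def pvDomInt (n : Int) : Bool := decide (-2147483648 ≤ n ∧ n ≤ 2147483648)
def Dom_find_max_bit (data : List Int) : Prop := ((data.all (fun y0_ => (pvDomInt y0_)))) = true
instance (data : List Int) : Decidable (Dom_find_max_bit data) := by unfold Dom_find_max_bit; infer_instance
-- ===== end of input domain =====

-- B replaces A's doubling while-loop and modulo branch with bit_length()+1 and one ceiling-division expression (simpler).


-- ===== PORT A =====
-- A's while-loop, with a fuel bound (maxBit doubles from 1, so maxAbs.toNat + 1 steps always suffice)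
def findMaxBitLoop (fuel : Nat) (maxAbs maxBit numBits : Int) : Int :=
  match fuel with
  | 0 => numBits
  | f + 1 =>
      if maxBit < maxAbs + 1 then findMaxBitLoop f maxAbs (maxBit * 2) (numBits + 1)
      else numBits

def find_max_bit (data : List Int) : Int :=
  let maxAbs := data.foldl (fun m number => if |number| > m then |number| else m) 0
  let numBits := findMaxBitLoop (maxAbs.toNat + 1) maxAbs 1 1
  let maxRem := PySem.Int.mod numBits 4
  if maxRem = 0 then numBits else numBits + (4 - maxRem)

-- ===== PORT B =====
def find_max_bit_alt (data : List Int) : Int :=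
  let maxAbs := (data.map (fun n => |n|)).foldr max 0
  let numBits : Int := (PySem.Int.bitLength maxAbs : Int) + 1
  PySem.Int.floordiv (numBits + 3) 4 * 4

-- ===== PRECONDITION & SPEC =====
def Spec_find_max_bit (data : List Int) (out : Int) : Prop := out = find_max_bit_alt data
instance (data : List Int) (out : Int) : Decidable (Spec_find_max_bit data out) := by unfold Spec_find_max_bit; infer_instance

-- ===== CLAIM (what is proved, stated in full; the proofs are below) =====
def Claim_equal_find_max_bit : Prop := ∀ (data : List Int), Dom_find_max_bit data → Spec_find_max_bit data (find_max_bit data)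

-- ===== LEMMAS AND PROOFS =====

-- the foldr max of absolute values is nonnegative
theorem foldr_max_abs_nonneg (l : List Int) :
    0 ≤ (l.map (fun n => |n|)).foldr max 0 := by
  induction l with
  | nil => simp
  | cons n t ih => simp only [List.map_cons, List.foldr_cons, le_max_iff]; exact Or.inr ih

-- A's running-max fold equals max of acc and B's foldr max
theorem foldl_max_eq (l : List Int) (acc : Int) (hacc : 0 ≤ acc) :
    l.foldl (fun m number => if |number| > m then |number| else m) acc
      = max acc ((l.map (fun n => |n|)).foldr max 0) := by
  induction l generalizing acc with
  | nil =>
    simpa using (max_eq_left hacc).symm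
  | cons n t ih =>
    simp only [List.foldl_cons, List.map_cons, List.foldr_cons]
    rcases le_or_gt |n| acc with h | h
    · rw [if_neg (not_lt.mpr h), ih _ hacc]
      simp only [max_def]
      split_ifs <;> omega
    · rw [if_pos h, ih _ (by positivity)]
      simp only [max_def]
      split_ifs <;> omega

-- bitLength characterisation: j < bitLength m ↔ 2^j ≤ |m|
theorem lt_bitLength_iff (m : Int) (j : Nat) :
    j < PySem.Int.bitLength m ↔ 2 ^ j ≤ m.natAbs := by
  constructor
  · intro h
    rcases eq_or_ne m 0 with rfl | hm
    · simp [PySem.Int.bitLength_zero] at h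
    · calc 2 ^ j ≤ 2 ^ (PySem.Int.bitLength m - 1) :=
            Nat.pow_le_pow_right (by norm_num) (by omega)
        _ ≤ m.natAbs := PySem.Int.two_pow_bitLength_le m hm
  · intro h
    by_contra hle
    have h1 : m.natAbs < 2 ^ PySem.Int.bitLength m := PySem.Int.lt_two_pow_bitLength m
    have h2 : (2 : Nat) ^ PySem.Int.bitLength m ≤ 2 ^ j :=
      Nat.pow_le_pow_right (by norm_num) (by omega)
    omega

-- the loop counts exactly bitLength m steps (invariant: maxBit = 2^j, j ≤ bitLength m)
theorem findMaxBitLoop_eq (m : Int) (hm : 0 ≤ m) :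
    ∀ (fuel j : Nat) (nb : Int), j ≤ PySem.Int.bitLength m →
      PySem.Int.bitLength m ≤ j + fuel →
      findMaxBitLoop fuel m ((2 : Int) ^ j) nb
        = nb + ((PySem.Int.bitLength m : Int) - j) := by
  intro fuel
  induction fuel with
  | zero =>
    intro j nb hj hB
    have : j = PySem.Int.bitLength m := by omega
    simp [findMaxBitLoop, this]
  | succ f ih =>
    intro j nb hj hB
    have hcast : ((2 : Int) ^ j) = ((2 ^ j : Nat) : Int) := by push_cast; ring
    have habs : m.natAbs = m.toNat := by omega
    by_cases hc : (2 : Int) ^ j < m + 1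
    · have hle : 2 ^ j ≤ m.natAbs := by
        rw [hcast] at hc; omega
      have hjB : j < PySem.Int.bitLength m := (lt_bitLength_iff m j).mpr hle
      rw [findMaxBitLoop, if_pos hc]
      have hpow : (2 : Int) ^ j * 2 = (2 : Int) ^ (j + 1) := by ring
      rw [hpow, ih (j + 1) (nb + 1) (by omega) (by omega)]
      push_cast
      ring
    · have hlt : m.natAbs < 2 ^ j := by
        rw [hcast] at hc; omega
      have hBj : PySem.Int.bitLength m ≤ j := by
        by_contra hx
        exact absurd ((lt_bitLength_iff m j).mp (by omega)) (by omega)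
      have : j = PySem.Int.bitLength m := by omega
      rw [findMaxBitLoop, if_neg hc, this]
      simp

-- bitLength is small enough for the fuel: bitLength m ≤ m.toNat + 1 for 0 ≤ m
theorem bitLength_le_fuel (m : Int) (hm : 0 ≤ m) :
    PySem.Int.bitLength m ≤ m.toNat + 1 := by
  rcases eq_or_ne m 0 with rfl | hne
  · simp [PySem.Int.bitLength_zero]
  · have h1 : 2 ^ (PySem.Int.bitLength m - 1) ≤ m.natAbs := PySem.Int.two_pow_bitLength_le m hne
    have h2 : PySem.Int.bitLength m - 1 < 2 ^ (PySem.Int.bitLength m - 1) :=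
      Nat.lt_two_pow_self
    omega

-- rounding up to a multiple of 4: the modulo branch equals the ceiling division
theorem round_up_eq (nb : Int) :
    (if PySem.Int.mod nb 4 = 0 then nb else nb + (4 - PySem.Int.mod nb 4))
      = PySem.Int.floordiv (nb + 3) 4 * 4 := by
  rw [PySem.Int.mod_eq_emod_of_pos (show (0:Int) < 4 by norm_num),
      PySem.Int.floordiv_eq_ediv_of_pos (show (0:Int) < 4 by norm_num)]
  omega

-- ===== VERDICT (by name: the statement is the Claim_ definition above) =====
theorem find_max_bit_spec : Claim_equal_find_max_bit := by
  intro data _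
  unfold Spec_find_max_bit find_max_bit find_max_bit_alt
  simp only
  set g := (data.map (fun n => |n|)).foldr max 0 with hg
  have hg0 : 0 ≤ g := foldr_max_abs_nonneg data
  have hfold : data.foldl (fun m number => if |number| > m then |number| else m) 0 = g := by
    rw [foldl_max_eq _ _ le_rfl]; exact max_eq_right hg0
  rw [hfold]
  have hloop : findMaxBitLoop (g.toNat + 1) g 1 1
      = 1 + ((PySem.Int.bitLength g : Int) - (0 : Nat)) := by
    have := findMaxBitLoop_eq g hg0 (g.toNat + 1) 0 1 (Nat.zero_le _)
      (by simpa using bitLength_le_fuel g hg0)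
    simpa using this
  rw [hloop]
  rw [round_up_eq]
  ring_nf
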